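-- pv_equiv track=rewrite | github.com/jdolivet/Programmation | Python/Artificial Intelligence/Project 4 - Constraint Satisfaction Problems/driver_3.py | isConsistant
-- ===== SOURCE A (Python) =====
-- def isConsistantListe(liste):
--     newList = []
--     for elt in liste:
--         if elt != 0:
--             newList.append(elt)
--     if len(newList) == len(set(newList)):
--         return True
--     else:
--         return False
--
-- def isConsistant(sudoku, assignment, variable, value):
--     sudokuTest = sudoku[:]
--     for position in assignment.keys():
--         ligne, colonne = position
--         valeur = assignment[position]
--         sudokuTest[9 * ligne + colonne] = valeur
--     ligne = variable[0]
--     colonne = variable[1]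
--     sudokuTest[9 * ligne + colonne] = value
--     sudokuLignes = [[0 for i in range(9)] for j in range(9)]
--     sudokuColonnes = [[0 for i in range(9)] for j in range(9)]
--     sudokuRegions = [[] for j in range(9)]
--     taille = len(sudokuTest)
--     for k in range(taille):
--         i = k // 9
--         j = k % 9
--         sudokuLignes[i][j] = sudokuTest[k]
--         sudokuColonnes[j][i] = sudokuTest[k]
--         ii = i // 3
--         jj = j // 3
--         sudokuRegions[ii+3*jj].append(sudokuTest[k])
--     for ligne in sudokuLignes:
--         if not isConsistantListe(ligne):
--             return False
--     for colonne in sudokuColonnes: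
--         if not isConsistantListe(colonne):
--             return False
--     for region in sudokuRegions:
--         if not isConsistantListe(region):
--             return False
--     return True
-- ===== SOURCE B (Python) =====
-- def isConsistant(sudoku, assignment, variable, value):
--     board = sudoku[:]
--     for (ligne, colonne), valeur in assignment.items():
--         board[9 * ligne + colonne] = valeur
--     board[9 * variable[0] + variable[1]] = value
--     rows = [set() for _ in range(9)]
--     cols = [set() for _ in range(9)]
--     regs = [set() for _ in range(9)]
--     for k, v in enumerate(board):
--         if v == 0:
--             continue
--         i, j = k // 9, k % 9
--         r = i // 3 + 3 * (j // 3)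
--         if v in rows[i] or v in cols[j] or v in regs[r]:
--             return False
--         rows[i].add(v)
--         cols[j].add(v)
--         regs[r].add(v)
--     return True
-- ===== Notes on version B (the rewrite author's own statement) =====
-- stated objective: alternative
-- what changed: Instead of materialising nine row-lists, nine column-lists and nine region-lists and then running a separate filter-and-dedup length check over each of the 27 groups, B makes a single pass over the 81 overlaid cells maintaining per-row/per-column/per-region seen-sets, rejecting immediately on the first collision (early exit).
import Mathlib
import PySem

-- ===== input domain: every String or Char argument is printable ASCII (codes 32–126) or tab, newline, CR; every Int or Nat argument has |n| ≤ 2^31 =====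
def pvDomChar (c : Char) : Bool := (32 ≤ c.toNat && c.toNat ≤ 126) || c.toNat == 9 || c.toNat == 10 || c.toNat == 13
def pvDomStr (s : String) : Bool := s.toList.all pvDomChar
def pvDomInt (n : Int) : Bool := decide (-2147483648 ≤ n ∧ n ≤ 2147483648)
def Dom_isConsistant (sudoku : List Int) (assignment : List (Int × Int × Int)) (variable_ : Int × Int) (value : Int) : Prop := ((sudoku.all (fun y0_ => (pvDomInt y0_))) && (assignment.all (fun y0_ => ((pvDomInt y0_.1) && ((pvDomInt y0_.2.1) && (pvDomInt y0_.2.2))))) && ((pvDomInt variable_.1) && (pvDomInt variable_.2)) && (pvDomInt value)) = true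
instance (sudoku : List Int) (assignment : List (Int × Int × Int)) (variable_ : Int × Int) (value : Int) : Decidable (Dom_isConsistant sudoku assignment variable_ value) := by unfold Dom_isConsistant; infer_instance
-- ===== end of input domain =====

-- B replaces A's build-27-group-lists-then-dedup-check phases by one pass over the overlaid board
-- with incremental row/column/region seen-sets and early exit on the first conflict; return value only.

-- ===== PORT A =====
def isConsistantListe (liste : List Int) : Bool :=
  let newList := liste.foldl (fun acc elt => if elt ≠ 0 then acc ++ [elt] else acc) []
  if newList.length = (PySem.Set.ofList newList).length then true else false

def isConsistant (sudoku : List Int) (assignment : List (Int × Int × Int)) (variable_ : Int × Int) (value : Int) : Bool :=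
  let sudokuTest := assignment.foldl
    (fun st t => PySem.List.pySetD st (9 * t.1 + t.2.1) t.2.2) sudoku
  let sudokuTest := PySem.List.pySetD sudokuTest (9 * variable_.1 + variable_.2) value
  let sudokuLignes := (PySem.List.pyRange 0 9 1).map (fun _ => (PySem.List.pyRange 0 9 1).map (fun _ => (0 : Int)))
  let sudokuColonnes := (PySem.List.pyRange 0 9 1).map (fun _ => (PySem.List.pyRange 0 9 1).map (fun _ => (0 : Int)))
  let sudokuRegions := (PySem.List.pyRange 0 9 1).map (fun _ => ([] : List Int))
  let taille : Int := (sudokuTest.length : Int)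
  let mats := (PySem.List.pyRange 0 taille 1).foldl
    (fun (acc : List (List Int) × List (List Int) × List (List Int)) k =>
      let i := PySem.Int.floordiv k 9
      let j := PySem.Int.mod k 9
      let v := PySem.List.pyGetD sudokuTest k 0
      let lg := PySem.List.pySetD acc.1 i (PySem.List.pySetD (PySem.List.pyGetD acc.1 i []) j v)
      let cl := PySem.List.pySetD acc.2.1 j (PySem.List.pySetD (PySem.List.pyGetD acc.2.1 j []) i v)
      let ii := PySem.Int.floordiv i 3
      let jj := PySem.Int.floordiv j 3
      let rg := PySem.List.pySetD acc.2.2 (ii + 3 * jj) ((PySem.List.pyGetD acc.2.2 (ii + 3 * jj) []) ++ [v])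
      (lg, cl, rg))
    (sudokuLignes, sudokuColonnes, sudokuRegions)
  mats.1.all isConsistantListe && mats.2.1.all isConsistantListe && mats.2.2.all isConsistantListe

-- ===== PORT B =====
def pvEmpty9 : List (PySem.Set Int) := (PySem.List.pyRange 0 9 1).map (fun _ => PySem.Set.empty)

def pvCheck : List Int → Int → List (PySem.Set Int) → List (PySem.Set Int) → List (PySem.Set Int) → Bool
  | [], _, _, _, _ => true
  | v :: rest, k, rows, cols, regs =>
    if v = 0 then pvCheck rest (k + 1) rows cols regs
    else
      let i := PySem.Int.floordiv k 9
      let j := PySem.Int.mod k 9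
      let r := PySem.Int.floordiv i 3 + 3 * PySem.Int.floordiv j 3
      if PySem.Set.contains (PySem.List.pyGetD rows i PySem.Set.empty) v
          || PySem.Set.contains (PySem.List.pyGetD cols j PySem.Set.empty) v
          || PySem.Set.contains (PySem.List.pyGetD regs r PySem.Set.empty) v then false
      else
        pvCheck rest (k + 1)
          (PySem.List.pySetD rows i (PySem.Set.add (PySem.List.pyGetD rows i PySem.Set.empty) v))
          (PySem.List.pySetD cols j (PySem.Set.add (PySem.List.pyGetD cols j PySem.Set.empty) v))
          (PySem.List.pySetD regs r (PySem.Set.add (PySem.List.pyGetD regs r PySem.Set.empty) v))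

def isConsistant_alt (sudoku : List Int) (assignment : List (Int × Int × Int)) (variable_ : Int × Int) (value : Int) : Bool :=
  let board := assignment.foldl
    (fun st t => PySem.List.pySetD st (9 * t.1 + t.2.1) t.2.2) sudoku
  let board := PySem.List.pySetD board (9 * variable_.1 + variable_.2) value
  pvCheck board 0 pvEmpty9 pvEmpty9 pvEmpty9

-- ===== PRECONDITION & SPEC =====
-- Pre_ excludes exactly the inputs where A raises IndexError (a board longer than 81 cells, or an
-- assignment/variable cell index outside the board).  The Nodup conjunct only pins down the
-- association-list representation of the Python dict argument: a dict cannot hold duplicate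
-- (row, column) keys, so it excludes no realisable Python input.
def Pre_isConsistant (sudoku : List Int) (assignment : List (Int × Int × Int)) (variable_ : Int × Int) (value : Int) : Prop :=
  sudoku.length ≤ 81 ∧
  (∀ t ∈ assignment, PySem.Raise.InRange sudoku.length (9 * t.1 + t.2.1)) ∧
  PySem.Raise.InRange sudoku.length (9 * variable_.1 + variable_.2) ∧
  (assignment.map (fun t => (t.1, t.2.1))).Nodup
instance (sudoku : List Int) (assignment : List (Int × Int × Int)) (variable_ : Int × Int) (value : Int) : Decidable (Pre_isConsistant sudoku assignment variable_ value) := by unfold Pre_isConsistant; infer_instance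

def pvWitness_isConsistant : List Int × (List (Int × Int × Int)) × (Int × Int) × Int :=
  (List.replicate 81 0, [(0, 1, 5)], (0, 0), 3)

def Spec_isConsistant (sudoku : List Int) (assignment : List (Int × Int × Int)) (variable_ : Int × Int) (value : Int) (out : Bool) : Prop := out = isConsistant_alt sudoku assignment variable_ value
instance (sudoku : List Int) (assignment : List (Int × Int × Int)) (variable_ : Int × Int) (value : Int) (out : Bool) : Decidable (Spec_isConsistant sudoku assignment variable_ value out) := by unfold Spec_isConsistant; infer_instance

-- ===== CLAIM (what is proved, stated in full; the proofs are below) =====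
def Claim_equal_isConsistant : Prop := ∀ (sudoku : List Int) (assignment : List (Int × Int × Int)) (variable_ : Int × Int) (value : Int), Dom_isConsistant sudoku assignment variable_ value → Pre_isConsistant sudoku assignment variable_ value → Spec_isConsistant sudoku assignment variable_ value (isConsistant sudoku assignment variable_ value)

-- ===== LEMMAS AND PROOFS =====
def pvConf (st : List Int) (k1 k2 : Nat) : Prop :=
  st.getD k1 0 ≠ 0 ∧ st.getD k2 0 ≠ 0 ∧
  (k1 / 9 = k2 / 9 ∨ k1 % 9 = k2 % 9 ∨
    k1 / 9 / 3 + 3 * (k1 % 9 / 3) = k2 / 9 / 3 + 3 * (k2 % 9 / 3)) ∧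
  st.getD k1 0 = st.getD k2 0

def pvGood (st : List Int) : Prop := ∀ k1 k2 : Nat, k1 < k2 → k2 < st.length → ¬ pvConf st k1 k2

def pvRSet (st : List Int) (i m : Nat) : PySem.Set Int :=
  PySem.Set.ofList (((List.range m).filter (fun k => k / 9 = i ∧ st.getD k 0 ≠ 0)).map (fun k => st.getD k 0))

def pvCSet (st : List Int) (j m : Nat) : PySem.Set Int :=
  PySem.Set.ofList (((List.range m).filter (fun k => k % 9 = j ∧ st.getD k 0 ≠ 0)).map (fun k => st.getD k 0))

def pvGSet (st : List Int) (r m : Nat) : PySem.Set Int :=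
  PySem.Set.ofList (((List.range m).filter (fun k => k / 9 / 3 + 3 * (k % 9 / 3) = r ∧ st.getD k 0 ≠ 0)).map (fun k => st.getD k 0))

def pvMatR (st : List Int) (m : Nat) : List (List Int) :=
  (List.range 9).map (fun i => (List.range 9).map (fun j => if 9 * i + j < m then st.getD (9 * i + j) 0 else 0))

def pvMatC (st : List Int) (m : Nat) : List (List Int) :=
  (List.range 9).map (fun j => (List.range 9).map (fun i => if 9 * i + j < m then st.getD (9 * i + j) 0 else 0))

def pvMatG (st : List Int) (m : Nat) : List (List Int) :=
  (List.range 9).map (fun r => ((List.range m).filter (fun k => k / 9 / 3 + 3 * (k % 9 / 3) = r)).map (fun k => st.getD k 0))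

theorem pvPairwiseFilterRange (n : Nat) (q : Nat → Bool) (R : Nat → Nat → Prop) :
    List.Pairwise R ((List.range n).filter q) ↔ ∀ k1 k2, k1 < k2 → k2 < n → q k1 → q k2 → R k1 k2 := by
  rw [List.pairwise_filter, List.pairwise_iff_getElem]
  constructor
  · intro h k1 k2 h12 h2n q1 q2
    have hlen : (List.range n).length = n := List.length_range ..
    have := h k1 k2 (by omega) (by omega) h12
    simp only [List.getElem_range] at this
    exact this q1 q2
  · intro h i j hi hj hij
    simp only [List.getElem_range]
    intro qi qj
    exact h i j hij (by simpa using hj) qi qj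

theorem pvOfListSublist {α : Type} [BEq α] (xs : List α) : (PySem.Set.ofList xs).Sublist xs := by
  induction xs using List.reverseRecOn with
  | nil => simp [PySem.Set.ofList_nil]
  | append_singleton xs x ih =>
    rw [PySem.Set.ofList_append_singleton, PySem.Set.add]
    split
    · exact ih.trans (List.sublist_append_left _ _)
    · exact List.Sublist.append ih (List.Sublist.refl _)

theorem pvLenIff (xs : List Int) : xs.length = (PySem.Set.ofList xs).length ↔ xs.Nodup := by
  constructor
  · intro h
    have := (pvOfListSublist xs).eq_of_length h.symm
    rw [← this]; exact PySem.Set.nodup_ofList xs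
  · intro h; rw [PySem.Set.ofList_eq_self_of_nodup xs h]

theorem pvListe_iff (l : List Int) :
    (isConsistantListe l = true ↔ (l.filter (fun x => x ≠ 0)).Nodup) := by
  unfold isConsistantListe
  rw [PySem.List.foldl_append_ite_eq_filter]
  simp only [List.nil_append]
  split_ifs with h
  · simpa using (pvLenIff _).1 h
  · simp only [false_iff]
    exact fun hn => h ((pvLenIff _).2 hn)

theorem pvRowIff (st : List Int) (i : Nat) :
    (isConsistantListe ((List.range 9).map (fun j => if 9 * i + j < st.length then st.getD (9 * i + j) 0 else 0)) = true)
    ↔ ∀ j1 j2, j1 < j2 → j2 < 9 → 9 * i + j2 < st.length →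
        st.getD (9 * i + j1) 0 ≠ 0 → st.getD (9 * i + j2) 0 ≠ 0 →
        st.getD (9 * i + j1) 0 ≠ st.getD (9 * i + j2) 0 := by
  rw [pvListe_iff, List.filter_map, List.Nodup, List.pairwise_map, pvPairwiseFilterRange]
  simp only [Function.comp_apply, decide_eq_true_eq]
  constructor
  · intro h j1 j2 h12 h29 hlt nz1 nz2
    have h1n : 9 * i + j1 < st.length := by omega
    have := h j1 j2 h12 h29 (by rw [if_pos h1n]; exact nz1) (by rw [if_pos hlt]; exact nz2)
    rwa [if_pos h1n, if_pos hlt] at this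
  · intro h j1 j2 h12 h29 q1 q2
    by_cases h2n : 9 * i + j2 < st.length
    · by_cases h1n : 9 * i + j1 < st.length
      · rw [if_pos h1n, if_pos h2n]
        rw [if_pos h1n] at q1; rw [if_pos h2n] at q2
        exact h j1 j2 h12 h29 h2n q1 q2
      · rw [if_neg h1n] at q1; simp at q1
    · rw [if_neg h2n] at q2; simp at q2

theorem pvColIff (st : List Int) (j : Nat) :
    (isConsistantListe ((List.range 9).map (fun i => if 9 * i + j < st.length then st.getD (9 * i + j) 0 else 0)) = true)
    ↔ ∀ i1 i2, i1 < i2 → i2 < 9 → 9 * i2 + j < st.length →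
        st.getD (9 * i1 + j) 0 ≠ 0 → st.getD (9 * i2 + j) 0 ≠ 0 →
        st.getD (9 * i1 + j) 0 ≠ st.getD (9 * i2 + j) 0 := by
  rw [pvListe_iff, List.filter_map, List.Nodup, List.pairwise_map, pvPairwiseFilterRange]
  simp only [Function.comp_apply, decide_eq_true_eq]
  constructor
  · intro h i1 i2 h12 h29 hlt nz1 nz2
    have h1n : 9 * i1 + j < st.length := by omega
    have := h i1 i2 h12 h29 (by rw [if_pos h1n]; exact nz1) (by rw [if_pos hlt]; exact nz2)
    rwa [if_pos h1n, if_pos hlt] at this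
  · intro h i1 i2 h12 h29 q1 q2
    by_cases h2n : 9 * i2 + j < st.length
    · by_cases h1n : 9 * i1 + j < st.length
      · rw [if_pos h1n, if_pos h2n]
        rw [if_pos h1n] at q1; rw [if_pos h2n] at q2
        exact h i1 i2 h12 h29 h2n q1 q2
      · rw [if_neg h1n] at q1; simp at q1
    · rw [if_neg h2n] at q2; simp at q2

theorem pvRegIff (st : List Int) (r : Nat) :
    (isConsistantListe (((List.range st.length).filter (fun k => k / 9 / 3 + 3 * (k % 9 / 3) = r)).map (fun k => st.getD k 0)) = true)
    ↔ ∀ k1 k2, k1 < k2 → k2 < st.length →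
        k1 / 9 / 3 + 3 * (k1 % 9 / 3) = r → k2 / 9 / 3 + 3 * (k2 % 9 / 3) = r →
        st.getD k1 0 ≠ 0 → st.getD k2 0 ≠ 0 →
        st.getD k1 0 ≠ st.getD k2 0 := by
  rw [pvListe_iff, List.filter_map, List.Nodup, List.pairwise_map, List.filter_filter,
      pvPairwiseFilterRange]
  simp only [Function.comp_apply, Bool.and_eq_true, decide_eq_true_eq, and_imp]
  constructor
  · intro h k1 k2 h12 h2n e1 e2 nz1 nz2
    exact h k1 k2 h12 h2n nz1 e1 nz2 e2
  · intro h k1 k2 h12 h2n nz1 e1 nz2 e2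
    exact h k1 k2 h12 h2n e1 e2 nz1 nz2

theorem pvA_iff (st : List Int) (hn : st.length ≤ 81) :
    ((pvMatR st st.length).all isConsistantListe
      && (pvMatC st st.length).all isConsistantListe
      && (pvMatG st st.length).all isConsistantListe) = true ↔ pvGood st := by
  unfold pvMatR pvMatC pvMatG
  simp only [Bool.and_eq_true, List.all_eq_true, List.mem_map, List.mem_range,
    forall_exists_index, and_imp, forall_apply_eq_imp_iff₂]
  constructor
  · rintro ⟨⟨hrow, hcol⟩, hreg⟩ k1 k2 h12 h2n ⟨nz1, nz2, hsame, heq⟩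
    rcases hsame with hs | hs | hs
    · have hi : k1 / 9 < 9 := by omega
      have := (pvRowIff st (k1 / 9)).1 (hrow _ hi) (k1 % 9) (k2 % 9) (by omega) (by omega) (by omega)
      rw [show 9 * (k1 / 9) + k1 % 9 = k1 by omega, show 9 * (k1 / 9) + k2 % 9 = k2 by omega] at this
      exact this nz1 nz2 heq
    · have hj : k1 % 9 < 9 := by omega
      have := (pvColIff st (k1 % 9)).1 (hcol _ hj) (k1 / 9) (k2 / 9) (by omega) (by omega) (by omega)
      rw [show 9 * (k1 / 9) + k1 % 9 = k1 by omega, show 9 * (k2 / 9) + k1 % 9 = k2 by omega] at this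
      exact this nz1 nz2 heq
    · have hr : k1 / 9 / 3 + 3 * (k1 % 9 / 3) < 9 := by omega
      exact (pvRegIff st _).1 (hreg _ hr) k1 k2 h12 h2n rfl hs.symm nz1 nz2 heq
  · intro hgood
    refine ⟨⟨?_, ?_⟩, ?_⟩
    · intro i hi
      rw [pvRowIff]
      intro j1 j2 h12 h29 hlt nz1 nz2 heq
      exact hgood (9 * i + j1) (9 * i + j2) (by omega) hlt ⟨nz1, nz2, Or.inl (by omega), heq⟩
    · intro j hj
      rw [pvColIff]
      intro i1 i2 h12 h29 hlt nz1 nz2 heq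
      exact hgood (9 * i1 + j) (9 * i2 + j) (by omega) hlt ⟨nz1, nz2, Or.inr (Or.inl (by omega)), heq⟩
    · intro r hr
      rw [pvRegIff]
      intro k1 k2 h12 h2n e1 e2 nz1 nz2 heq
      exact hgood k1 k2 h12 h2n ⟨nz1, nz2, Or.inr (Or.inr (by omega)), heq⟩

theorem pvGetDMapRange {α : Type} (f : Nat → α) (n i : Nat) (hi : i < n) (d : α) :
    ((List.range n).map f).getD i d = f i := by
  rw [List.getD_eq_getElem _ _ (by simpa using hi)]
  simp

theorem pvSetMapRange {α : Type} (f : Nat → α) (n i : Nat) (x : α) :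
    ((List.range n).map f).set i x = (List.range n).map (fun i' => if i' = i then x else f i') := by
  apply List.ext_getElem
  · simp
  · intro p h1 h2
    simp only [List.getElem_set, List.getElem_map, List.getElem_range]
    by_cases h : i = p
    · simp [h]
    · rw [if_neg h, if_neg (by omega)]

theorem pvA_fold (st : List Int) (hn : st.length ≤ 81) (m : Nat) (hm : m ≤ st.length) :
    (PySem.List.pyRange 0 (m : Int) 1).foldl
      (fun (acc : List (List Int) × List (List Int) × List (List Int)) k =>
        let i := PySem.Int.floordiv k 9
        let j := PySem.Int.mod k 9
        let v := PySem.List.pyGetD st k 0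
        let lg := PySem.List.pySetD acc.1 i (PySem.List.pySetD (PySem.List.pyGetD acc.1 i []) j v)
        let cl := PySem.List.pySetD acc.2.1 j (PySem.List.pySetD (PySem.List.pyGetD acc.2.1 j []) i v)
        let ii := PySem.Int.floordiv i 3
        let jj := PySem.Int.floordiv j 3
        let rg := PySem.List.pySetD acc.2.2 (ii + 3 * jj) ((PySem.List.pyGetD acc.2.2 (ii + 3 * jj) []) ++ [v])
        (lg, cl, rg))
      ((PySem.List.pyRange 0 9 1).map (fun _ => (PySem.List.pyRange 0 9 1).map (fun _ => (0 : Int))),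
       (PySem.List.pyRange 0 9 1).map (fun _ => (PySem.List.pyRange 0 9 1).map (fun _ => (0 : Int))),
       (PySem.List.pyRange 0 9 1).map (fun _ => ([] : List Int)))
    = (pvMatR st m, pvMatC st m, pvMatG st m) := by
  induction m with
  | zero =>
    rw [Nat.cast_zero, PySem.List.pyRange_one_eq_nil (le_refl (0 : Int)), List.foldl_nil]
    refine Prod.ext ?_ (Prod.ext ?_ ?_) <;> simp only
    · unfold pvMatR
      simp [PySem.List.pyRange_one]
      decide
    · unfold pvMatC
      simp [PySem.List.pyRange_one]
      decide
    · unfold pvMatG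
      simp [PySem.List.pyRange_one]
      decide
  | succ m ih =>
    have hm' : m ≤ st.length := by omega
    have hcast : ((m + 1 : Nat) : Int) = (m : Int) + 1 := by push_cast; ring
    rw [hcast, PySem.List.pyRange_one_succ_right (by positivity), List.foldl_append, ih hm']
    simp only [List.foldl_cons, List.foldl_nil]
    have hm81 : m < 81 := by omega
    have hq : m / 9 < 9 := by omega
    have hr : m % 9 < 9 := by omega
    have hg : m / 9 / 3 + 3 * (m % 9 / 3) < 9 := by omega
    have e1 : PySem.Int.floordiv (↑m) 9 = ((m / 9 : Nat) : Int) := by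
      exact_mod_cast PySem.Int.floordiv_natCast m 9
    have e2 : PySem.Int.mod (↑m) 9 = ((m % 9 : Nat) : Int) := by
      exact_mod_cast PySem.Int.mod_natCast m 9
    rw [e1, e2]
    have e3 : PySem.Int.floordiv ((m / 9 : Nat) : Int) 3 = ((m / 9 / 3 : Nat) : Int) := by
      exact_mod_cast PySem.Int.floordiv_natCast (m / 9) 3
    have e4 : PySem.Int.floordiv ((m % 9 : Nat) : Int) 3 = ((m % 9 / 3 : Nat) : Int) := by
      exact_mod_cast PySem.Int.floordiv_natCast (m % 9) 3
    rw [e3, e4]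
    simp only [PySem.List.pyGetD_natCast, PySem.List.pySetD_natCast]
    have hcast3 : ((m / 9 / 3 : Nat) : Int) + 3 * ((m % 9 / 3 : Nat) : Int) = ((m / 9 / 3 + 3 * (m % 9 / 3) : Nat) : Int) := by push_cast; ring
    rw [hcast3]
    simp only [PySem.List.pyGetD_natCast, PySem.List.pySetD_natCast]
    unfold pvMatR pvMatC pvMatG
    rw [pvGetDMapRange _ 9 _ hq, pvGetDMapRange _ 9 _ hr, pvGetDMapRange _ 9 _ hg]
    rw [pvSetMapRange _ 9, pvSetMapRange _ 9, pvSetMapRange _ 9,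
        pvSetMapRange _ 9, pvSetMapRange _ 9]
    refine Prod.ext ?_ (Prod.ext ?_ ?_) <;> simp only
    · apply List.map_congr_left
      intro i hi
      rw [List.mem_range] at hi
      by_cases hieq : i = m / 9
      · subst hieq
        rw [if_pos rfl]
        apply List.map_congr_left
        intro j hj
        rw [List.mem_range] at hj
        by_cases hjeq : j = m % 9
        · subst hjeq
          rw [if_pos rfl]
          have h5 : 9 * (m / 9) + m % 9 = m := by omega
          rw [h5, if_pos (by omega)]
        · rw [if_neg hjeq]
          have h5 : 9 * (m / 9) + j ≠ m := by omega
          split_ifs with h1 h2 h2 <;> first | rfl | omega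
      · rw [if_neg hieq]
        apply List.map_congr_left
        intro j hj
        rw [List.mem_range] at hj
        have h5 : 9 * i + j ≠ m := by omega
        split_ifs with h1 h2 h2 <;> first | rfl | omega
    · apply List.map_congr_left
      intro j hj
      rw [List.mem_range] at hj
      by_cases hjeq : j = m % 9
      · subst hjeq
        rw [if_pos rfl]
        apply List.map_congr_left
        intro i hi
        rw [List.mem_range] at hi
        by_cases hieq : i = m / 9
        · subst hieq
          rw [if_pos rfl]
          have h5 : 9 * (m / 9) + m % 9 = m := by omega
          rw [h5, if_pos (by omega)]
        · rw [if_neg hieq]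
          have h5 : 9 * i + m % 9 ≠ m := by omega
          split_ifs with h1 h2 h2 <;> first | rfl | omega
      · rw [if_neg hjeq]
        apply List.map_congr_left
        intro i hi
        rw [List.mem_range] at hi
        have h5 : 9 * i + j ≠ m := by omega
        split_ifs with h1 h2 h2 <;> first | rfl | omega
    · apply List.map_congr_left
      intro r hrr
      rw [List.mem_range] at hrr
      rw [List.range_succ, List.filter_append, List.map_append]
      by_cases hreq : r = m / 9 / 3 + 3 * (m % 9 / 3)
      · subst hreq
        rw [if_pos rfl]
        have h6 : List.filter (fun k => decide (k / 9 / 3 + 3 * (k % 9 / 3) = m / 9 / 3 + 3 * (m % 9 / 3))) [m] = [m] := by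
          simp
        rw [h6]
        simp
      · rw [if_neg hreq]
        have : List.filter (fun k => decide (k / 9 / 3 + 3 * (k % 9 / 3) = r)) [m] = [] := by
          simp; omega
        rw [this]
        simp

theorem pvMemRSet (st : List Int) (i m : Nat) (v : Int) :
    v ∈ pvRSet st i m ↔ ∃ k1, k1 < m ∧ k1 / 9 = i ∧ st.getD k1 0 ≠ 0 ∧ st.getD k1 0 = v := by
  unfold pvRSet
  rw [PySem.Set.mem_ofList]
  simp only [List.mem_map, List.mem_filter, List.mem_range, decide_eq_true_eq]
  constructor
  · rintro ⟨k1, ⟨hk, he⟩, hv⟩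
    exact ⟨k1, hk, he.1, he.2, hv⟩
  · rintro ⟨k1, hk, h9, hnz, hv⟩
    exact ⟨k1, ⟨hk, ⟨h9, hnz⟩⟩, hv⟩

theorem pvMemCSet (st : List Int) (j m : Nat) (v : Int) :
    v ∈ pvCSet st j m ↔ ∃ k1, k1 < m ∧ k1 % 9 = j ∧ st.getD k1 0 ≠ 0 ∧ st.getD k1 0 = v := by
  unfold pvCSet
  rw [PySem.Set.mem_ofList]
  simp only [List.mem_map, List.mem_filter, List.mem_range, decide_eq_true_eq]
  constructor
  · rintro ⟨k1, ⟨hk, he⟩, hv⟩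
    exact ⟨k1, hk, he.1, he.2, hv⟩
  · rintro ⟨k1, hk, h9, hnz, hv⟩
    exact ⟨k1, ⟨hk, ⟨h9, hnz⟩⟩, hv⟩

theorem pvMemGSet (st : List Int) (r m : Nat) (v : Int) :
    v ∈ pvGSet st r m ↔ ∃ k1, k1 < m ∧ k1 / 9 / 3 + 3 * (k1 % 9 / 3) = r ∧ st.getD k1 0 ≠ 0 ∧ st.getD k1 0 = v := by
  unfold pvGSet
  rw [PySem.Set.mem_ofList]
  simp only [List.mem_map, List.mem_filter, List.mem_range, decide_eq_true_eq]
  constructor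
  · rintro ⟨k1, ⟨hk, he⟩, hv⟩
    exact ⟨k1, hk, he.1, he.2, hv⟩
  · rintro ⟨k1, hk, h9, hnz, hv⟩
    exact ⟨k1, ⟨hk, ⟨h9, hnz⟩⟩, hv⟩

theorem pvRSet_succ (st : List Int) (i m : Nat) :
    pvRSet st i (m + 1) = if m / 9 = i ∧ st.getD m 0 ≠ 0
      then PySem.Set.add (pvRSet st i m) (st.getD m 0) else pvRSet st i m := by
  unfold pvRSet
  rw [List.range_succ, List.filter_append]
  split_ifs with h
  · have he : List.filter (fun k => decide (k / 9 = i ∧ st.getD k 0 ≠ 0)) [m] = [m] := by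
      simp only [List.filter_cons, List.filter_nil]
      rw [if_pos (by simpa using h)]
    rw [he, List.map_append]
    simp only [List.map_cons, List.map_nil]
    rw [PySem.Set.ofList_append_singleton]
  · have he : List.filter (fun k => decide (k / 9 = i ∧ st.getD k 0 ≠ 0)) [m] = [] := by
      simp only [List.filter_cons, List.filter_nil]
      rw [if_neg (by simpa using h)]
    rw [he, List.append_nil]

theorem pvCSet_succ (st : List Int) (j m : Nat) :
    pvCSet st j (m + 1) = if m % 9 = j ∧ st.getD m 0 ≠ 0
      then PySem.Set.add (pvCSet st j m) (st.getD m 0) else pvCSet st j m := by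
  unfold pvCSet
  rw [List.range_succ, List.filter_append]
  split_ifs with h
  · have he : List.filter (fun k => decide (k % 9 = j ∧ st.getD k 0 ≠ 0)) [m] = [m] := by
      simp only [List.filter_cons, List.filter_nil]
      rw [if_pos (by simpa using h)]
    rw [he, List.map_append]
    simp only [List.map_cons, List.map_nil]
    rw [PySem.Set.ofList_append_singleton]
  · have he : List.filter (fun k => decide (k % 9 = j ∧ st.getD k 0 ≠ 0)) [m] = [] := by
      simp only [List.filter_cons, List.filter_nil]
      rw [if_neg (by simpa using h)]
    rw [he, List.append_nil]

theorem pvGSet_succ (st : List Int) (r m : Nat) :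
    pvGSet st r (m + 1) = if m / 9 / 3 + 3 * (m % 9 / 3) = r ∧ st.getD m 0 ≠ 0
      then PySem.Set.add (pvGSet st r m) (st.getD m 0) else pvGSet st r m := by
  unfold pvGSet
  rw [List.range_succ, List.filter_append]
  split_ifs with h
  · have he : List.filter (fun k => decide (k / 9 / 3 + 3 * (k % 9 / 3) = r ∧ st.getD k 0 ≠ 0)) [m] = [m] := by
      simp only [List.filter_cons, List.filter_nil]
      rw [if_pos (by simpa using h)]
    rw [he, List.map_append]
    simp only [List.map_cons, List.map_nil]
    rw [PySem.Set.ofList_append_singleton]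
  · have he : List.filter (fun k => decide (k / 9 / 3 + 3 * (k % 9 / 3) = r ∧ st.getD k 0 ≠ 0)) [m] = [] := by
      simp only [List.filter_cons, List.filter_nil]
      rw [if_neg (by simpa using h)]
    rw [he, List.append_nil]

theorem pvCheck_inv (st : List Int) (hn : st.length ≤ 81) :
    ∀ d m, m ≤ st.length → st.length - m = d →
    (pvCheck (st.drop m) (m : Int)
        ((List.range 9).map (fun i => pvRSet st i m))
        ((List.range 9).map (fun j => pvCSet st j m))
        ((List.range 9).map (fun r => pvGSet st r m)) = true ↔
      ∀ k1 k2 : Nat, k1 < k2 → k2 < st.length → m ≤ k2 → ¬ pvConf st k1 k2) := by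
  intro d
  induction d with
  | zero =>
    intro m hm hd
    have : m = st.length := by omega
    subst this
    rw [List.drop_length]
    simp only [pvCheck, true_iff]
    intro k1 k2 _ h2 hm2
    omega
  | succ d ih =>
    intro m hm hd
    have hmlt : m < st.length := by omega
    have hm81 : m < 81 := by omega
    have hq : m / 9 < 9 := by omega
    have hr9 : m % 9 < 9 := by omega
    have hg9 : m / 9 / 3 + 3 * (m % 9 / 3) < 9 := by omega
    rw [List.drop_eq_getElem_cons hmlt]
    have hgetd : st[m] = st.getD m 0 := (List.getD_eq_getElem st 0 hmlt).symm
    rw [hgetd]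
    simp only [pvCheck]
    have e1 : PySem.Int.floordiv (↑m) 9 = ((m / 9 : Nat) : Int) := by
      exact_mod_cast PySem.Int.floordiv_natCast m 9
    have e2 : PySem.Int.mod (↑m) 9 = ((m % 9 : Nat) : Int) := by
      exact_mod_cast PySem.Int.mod_natCast m 9
    have e3 : PySem.Int.floordiv ((m / 9 : Nat) : Int) 3 = ((m / 9 / 3 : Nat) : Int) := by
      exact_mod_cast PySem.Int.floordiv_natCast (m / 9) 3
    have e4 : PySem.Int.floordiv ((m % 9 : Nat) : Int) 3 = ((m % 9 / 3 : Nat) : Int) := by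
      exact_mod_cast PySem.Int.floordiv_natCast (m % 9) 3
    have hcast3 : ((m / 9 / 3 : Nat) : Int) + 3 * ((m % 9 / 3 : Nat) : Int)
        = ((m / 9 / 3 + 3 * (m % 9 / 3) : Nat) : Int) := by push_cast; ring
    simp only [e1, e2, e3, e4, hcast3, PySem.List.pyGetD_natCast]
    rw [pvGetDMapRange _ 9 _ hq, pvGetDMapRange _ 9 _ hr9, pvGetDMapRange _ 9 _ hg9]
    have hcast1 : ((m : Int) + 1) = ((m + 1 : Nat) : Int) := by push_cast; ring
    by_cases hz : st.getD m 0 = 0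
    · rw [if_pos hz, hcast1]
      have hR : (List.range 9).map (fun i => pvRSet st i (m + 1)) = (List.range 9).map (fun i => pvRSet st i m) :=
        List.map_congr_left fun i _ => by rw [pvRSet_succ, if_neg (by tauto)]
      have hC : (List.range 9).map (fun j => pvCSet st j (m + 1)) = (List.range 9).map (fun j => pvCSet st j m) :=
        List.map_congr_left fun j _ => by rw [pvCSet_succ, if_neg (by tauto)]
      have hG : (List.range 9).map (fun r => pvGSet st r (m + 1)) = (List.range 9).map (fun r => pvGSet st r m) :=
        List.map_congr_left fun r _ => by rw [pvGSet_succ, if_neg (by tauto)]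
      rw [← hR, ← hC, ← hG, ih (m + 1) (by omega) (by omega)]
      constructor
      · intro h k1 k2 h12 h2n hm2
        by_cases hk2 : k2 = m
        · subst hk2
          rintro ⟨_, nz2, _, _⟩
          exact nz2 hz
        · exact h k1 k2 h12 h2n (by omega)
      · intro h k1 k2 h12 h2n hm2
        exact h k1 k2 h12 h2n (by omega)
    · rw [if_neg hz]
      by_cases hb : (PySem.Set.contains (pvRSet st (m / 9) m) (st.getD m 0)
          || PySem.Set.contains (pvCSet st (m % 9) m) (st.getD m 0)
          || PySem.Set.contains (pvGSet st (m / 9 / 3 + 3 * (m % 9 / 3)) m) (st.getD m 0)) = true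
      · rw [if_pos hb]
        simp only [Bool.false_eq_true, false_iff, not_forall]
        simp only [Bool.or_eq_true, PySem.Set.contains_iff, pvMemRSet, pvMemCSet, pvMemGSet] at hb
        rcases hb with (⟨k1, hk, hsm, nz1, hv⟩ | ⟨k1, hk, hsm, nz1, hv⟩) | ⟨k1, hk, hsm, nz1, hv⟩
        · exact ⟨k1, m, hk, hmlt, le_rfl, fun hcon => hcon ⟨nz1, hz, Or.inl hsm, hv⟩⟩
        · exact ⟨k1, m, hk, hmlt, le_rfl, fun hcon => hcon ⟨nz1, hz, Or.inr (Or.inl hsm), hv⟩⟩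
        · exact ⟨k1, m, hk, hmlt, le_rfl, fun hcon => hcon ⟨nz1, hz, Or.inr (Or.inr hsm), hv⟩⟩
      · rw [if_neg hb]
        simp only [PySem.List.pySetD_natCast]
        rw [pvSetMapRange _ 9, pvSetMapRange _ 9, pvSetMapRange _ 9]
        have hR : (List.range 9).map (fun i' => if i' = m / 9 then PySem.Set.add (pvRSet st (m / 9) m) (st.getD m 0) else pvRSet st i' m)
            = (List.range 9).map (fun i => pvRSet st i (m + 1)) :=
          List.map_congr_left fun i _ => by
            by_cases hieq : i = m / 9
            · subst hieq
              rw [if_pos rfl, pvRSet_succ, if_pos ⟨rfl, hz⟩]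
            · rw [if_neg hieq, pvRSet_succ, if_neg (by tauto)]
        have hC : (List.range 9).map (fun j' => if j' = m % 9 then PySem.Set.add (pvCSet st (m % 9) m) (st.getD m 0) else pvCSet st j' m)
            = (List.range 9).map (fun j => pvCSet st j (m + 1)) :=
          List.map_congr_left fun j _ => by
            by_cases hjeq : j = m % 9
            · subst hjeq
              rw [if_pos rfl, pvCSet_succ, if_pos ⟨rfl, hz⟩]
            · rw [if_neg hjeq, pvCSet_succ, if_neg (by tauto)]
        have hG : (List.range 9).map (fun r' => if r' = m / 9 / 3 + 3 * (m % 9 / 3) then PySem.Set.add (pvGSet st (m / 9 / 3 + 3 * (m % 9 / 3)) m) (st.getD m 0) else pvGSet st r' m)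
            = (List.range 9).map (fun r => pvGSet st r (m + 1)) :=
          List.map_congr_left fun r _ => by
            by_cases hreq : r = m / 9 / 3 + 3 * (m % 9 / 3)
            · subst hreq
              rw [if_pos rfl, pvGSet_succ, if_pos ⟨rfl, hz⟩]
            · rw [if_neg hreq, pvGSet_succ, if_neg (by tauto)]
        rw [hR, hC, hG, hcast1, ih (m + 1) (by omega) (by omega)]
        simp only [Bool.or_eq_true, PySem.Set.contains_iff, pvMemRSet, pvMemCSet, pvMemGSet] at hb
        push_neg at hb
        obtain ⟨⟨hbR, hbC⟩, hbG⟩ := hb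
        constructor
        · intro h k1 k2 h12 h2n hm2
          by_cases hk2 : k2 = m
          · subst hk2
            rintro ⟨nz1, nz2, hsame, heq⟩
            rcases hsame with hs | hs | hs
            · exact (hbR k1 h12 hs nz1) heq
            · exact (hbC k1 h12 hs nz1) heq
            · exact (hbG k1 h12 hs nz1) heq
          · exact h k1 k2 h12 h2n (by omega)
        · intro h k1 k2 h12 h2n hm2
          exact h k1 k2 h12 h2n (by omega)

theorem pvB_iff (st : List Int) (hn : st.length ≤ 81) :
    (pvCheck st 0 pvEmpty9 pvEmpty9 pvEmpty9 = true ↔ pvGood st) := by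
  have h := pvCheck_inv st hn st.length 0 (by omega) (by omega)
  simp only [List.drop_zero, Nat.cast_zero] at h
  have eR : (List.range 9).map (fun i => pvRSet st i 0) = pvEmpty9 := by
    unfold pvEmpty9 pvRSet
    rw [PySem.List.pyRange_one]
    simp only [List.map_map]
    simp [PySem.Set.empty]
    decide
  have eC : (List.range 9).map (fun j => pvCSet st j 0) = pvEmpty9 := by
    unfold pvEmpty9 pvCSet
    rw [PySem.List.pyRange_one]
    simp only [List.map_map]
    simp [PySem.Set.empty]
    decide
  have eG : (List.range 9).map (fun r => pvGSet st r 0) = pvEmpty9 := by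
    unfold pvEmpty9 pvGSet
    rw [PySem.List.pyRange_one]
    simp only [List.map_map]
    simp [PySem.Set.empty]
    decide
  rw [eR, eC, eG] at h
  rw [h]
  exact ⟨fun hh k1 k2 a b => hh k1 k2 a b (Nat.zero_le _), fun hh k1 k2 a b _ => hh k1 k2 a b⟩

theorem pvFoldLen (assignment : List (Int × Int × Int)) (sudoku : List Int) :
    (assignment.foldl (fun st t => PySem.List.pySetD st (9 * t.1 + t.2.1) t.2.2) sudoku).length
      = sudoku.length := by
  induction assignment generalizing sudoku with
  | nil => rfl
  | cons t ts ih => simp [List.foldl_cons, ih, PySem.List.length_pySetD]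

theorem pvAB (st : List Int) (hn : st.length ≤ 81) :
    (((PySem.List.pyRange 0 ((st.length : Int)) 1).foldl
      (fun (acc : List (List Int) × List (List Int) × List (List Int)) k =>
        let i := PySem.Int.floordiv k 9
        let j := PySem.Int.mod k 9
        let v := PySem.List.pyGetD st k 0
        let lg := PySem.List.pySetD acc.1 i (PySem.List.pySetD (PySem.List.pyGetD acc.1 i []) j v)
        let cl := PySem.List.pySetD acc.2.1 j (PySem.List.pySetD (PySem.List.pyGetD acc.2.1 j []) i v)
        let ii := PySem.Int.floordiv i 3
        let jj := PySem.Int.floordiv j 3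
        let rg := PySem.List.pySetD acc.2.2 (ii + 3 * jj) ((PySem.List.pyGetD acc.2.2 (ii + 3 * jj) []) ++ [v])
        (lg, cl, rg))
      ((PySem.List.pyRange 0 9 1).map (fun _ => (PySem.List.pyRange 0 9 1).map (fun _ => (0 : Int))),
       (PySem.List.pyRange 0 9 1).map (fun _ => (PySem.List.pyRange 0 9 1).map (fun _ => (0 : Int))),
       (PySem.List.pyRange 0 9 1).map (fun _ => ([] : List Int)))).1.all isConsistantListe
    && ((PySem.List.pyRange 0 ((st.length : Int)) 1).foldl
      (fun (acc : List (List Int) × List (List Int) × List (List Int)) k =>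
        let i := PySem.Int.floordiv k 9
        let j := PySem.Int.mod k 9
        let v := PySem.List.pyGetD st k 0
        let lg := PySem.List.pySetD acc.1 i (PySem.List.pySetD (PySem.List.pyGetD acc.1 i []) j v)
        let cl := PySem.List.pySetD acc.2.1 j (PySem.List.pySetD (PySem.List.pyGetD acc.2.1 j []) i v)
        let ii := PySem.Int.floordiv i 3
        let jj := PySem.Int.floordiv j 3
        let rg := PySem.List.pySetD acc.2.2 (ii + 3 * jj) ((PySem.List.pyGetD acc.2.2 (ii + 3 * jj) []) ++ [v])
        (lg, cl, rg))
      ((PySem.List.pyRange 0 9 1).map (fun _ => (PySem.List.pyRange 0 9 1).map (fun _ => (0 : Int))),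
       (PySem.List.pyRange 0 9 1).map (fun _ => (PySem.List.pyRange 0 9 1).map (fun _ => (0 : Int))),
       (PySem.List.pyRange 0 9 1).map (fun _ => ([] : List Int)))).2.1.all isConsistantListe
    && ((PySem.List.pyRange 0 ((st.length : Int)) 1).foldl
      (fun (acc : List (List Int) × List (List Int) × List (List Int)) k =>
        let i := PySem.Int.floordiv k 9
        let j := PySem.Int.mod k 9
        let v := PySem.List.pyGetD st k 0
        let lg := PySem.List.pySetD acc.1 i (PySem.List.pySetD (PySem.List.pyGetD acc.1 i []) j v)
        let cl := PySem.List.pySetD acc.2.1 j (PySem.List.pySetD (PySem.List.pyGetD acc.2.1 j []) i v)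
        let ii := PySem.Int.floordiv i 3
        let jj := PySem.Int.floordiv j 3
        let rg := PySem.List.pySetD acc.2.2 (ii + 3 * jj) ((PySem.List.pyGetD acc.2.2 (ii + 3 * jj) []) ++ [v])
        (lg, cl, rg))
      ((PySem.List.pyRange 0 9 1).map (fun _ => (PySem.List.pyRange 0 9 1).map (fun _ => (0 : Int))),
       (PySem.List.pyRange 0 9 1).map (fun _ => (PySem.List.pyRange 0 9 1).map (fun _ => (0 : Int))),
       (PySem.List.pyRange 0 9 1).map (fun _ => ([] : List Int)))).2.2.all isConsistantListe)
    = pvCheck st 0 pvEmpty9 pvEmpty9 pvEmpty9 := by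
  rw [pvA_fold st hn st.length le_rfl]
  rw [Bool.eq_iff_iff, pvA_iff st hn, pvB_iff st hn]

-- ===== VERDICT (by name: the statement is the Claim_ definition above) =====
theorem isConsistant_spec : Claim_equal_isConsistant := by
  intro sudoku assignment variable_ value hdom hpre
  unfold Spec_isConsistant
  simp only [isConsistant, isConsistant_alt]
  have hlen : (PySem.List.pySetD
      (assignment.foldl (fun st t => PySem.List.pySetD st (9 * t.1 + t.2.1) t.2.2) sudoku)
      (9 * variable_.1 + variable_.2) value).length ≤ 81 := by
    rw [PySem.List.length_pySetD, pvFoldLen]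
    exact hpre.1
  exact pvAB _ hlen
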